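-- pv_equiv track=rewrite | github.com/famotime/reading_notes_cleaner | opml2md.py | clean_html_entities_in_attributes
-- ===== SOURCE A (Python) =====
-- def clean_html_entities_in_attributes(text):
--     """
--     清理text和_note属性中的HTML转义符号
--
--     Args:
--         text: 属性值字符串
--
--     Returns:
--         清理后的字符串
--     """
--     if not text:
--         return text
--
--     # 处理常见的HTML转义符号
--     replacements = {
--         '&lt;/a&gt;&#10;': '</a>\n',  # 链接结束标签 + 换行符
--         '&lt;a href=&quot;': '<a href="',  # 链接开始标签
--         '&quot;&gt;': '">',  # 链接属性结束
--         '&lt;/a&gt;': '</a>',  # 链接结束标签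
--         '&lt;': '<',  # 小于号
--         '&gt;': '>',  # 大于号
--         '&quot;': '"',  # 双引号
--         '&#10;': '\n',  # 换行符
--         '&#13;': '\r',  # 回车符
--         '&#9;': '\t',  # 制表符
--         '&amp;': '&',  # 和号（需要最后处理）
--     }
--
--     # 按顺序进行替换
--     for old, new in replacements.items():
--         text = text.replace(old, new)
--
--     return text
-- ===== SOURCE B (Python) =====
-- import re
--
-- # HTML entity sequences and their decoded forms; composite patterns come
-- # first so the regex alternation prefers them over their sub-entities.
-- _ENTITY_MAP = {
--     '&lt;/a&gt;&#10;': '</a>\n',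
--     '&lt;a href=&quot;': '<a href="',
--     '&quot;&gt;': '">',
--     '&lt;/a&gt;': '</a>',
--     '&lt;': '<',
--     '&gt;': '>',
--     '&quot;': '"',
--     '&#10;': '\n',
--     '&#13;': '\r',
--     '&#9;': '\t',
--     '&amp;': '&',
-- }
--
-- _ENTITY_RE = re.compile('|'.join(re.escape(k) for k in _ENTITY_MAP))
--
--
-- def clean_html_entities_in_attributes(text):
--     """Decode HTML-escaped entities in an attribute value in one pass."""
--     if not text:
--         return text
--     return _ENTITY_RE.sub(lambda m: _ENTITY_MAP[m.group(0)], text)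
-- ===== Notes on version B (the rewrite author's own statement) =====
-- stated objective: idiomatic
-- what changed: Replaces eleven sequential full-string str.replace passes with one compiled regex alternation over the entity keys (in insertion order, so composite patterns win) applied in a single left-to-right re.sub pass.
import Mathlib
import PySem

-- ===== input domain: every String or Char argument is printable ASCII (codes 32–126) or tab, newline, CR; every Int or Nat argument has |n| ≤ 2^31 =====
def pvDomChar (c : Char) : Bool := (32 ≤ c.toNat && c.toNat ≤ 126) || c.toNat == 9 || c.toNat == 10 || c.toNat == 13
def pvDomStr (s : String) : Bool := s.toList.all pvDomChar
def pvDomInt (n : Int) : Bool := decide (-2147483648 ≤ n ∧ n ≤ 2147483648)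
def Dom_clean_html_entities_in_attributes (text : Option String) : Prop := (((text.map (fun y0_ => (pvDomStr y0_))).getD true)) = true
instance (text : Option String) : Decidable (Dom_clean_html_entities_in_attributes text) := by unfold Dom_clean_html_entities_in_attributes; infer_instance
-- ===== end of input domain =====

set_option maxRecDepth 100000
set_option maxHeartbeats 2000000


-- B replaces A's eleven sequential full-string replace passes by a single left-to-right
-- scan (a compiled regex alternation over the same ordered entity table in Python);
-- proved to return the same value on every input.

-- ===== PORT A =====
-- literal transliteration of A: falsy guard, dict literal, one str.replace per item in order
def clean_html_entities_in_attributes (text : Option String) : Option String :=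
  match text with
  | none => none
  | some s =>
    if s = "" then some s
    else
      let replacements : PySem.Dict String String :=
        PySem.Dict.mk [("&lt;/a&gt;&#10;", "</a>\n"), ("&lt;a href=&quot;", "<a href=\""), ("&quot;&gt;", "\">"), ("&lt;/a&gt;", "</a>"), ("&lt;", "<"), ("&gt;", ">"), ("&quot;", "\""), ("&#10;", "\n"), ("&#13;", "\r"), ("&#9;", "\t"), ("&amp;", "&")]
      some (replacements.items.foldl (fun t pr => PySem.Str.replace t pr.1 pr.2) s)

-- ===== PORT B =====
-- B's entity table, in insertion order (= the order of the regex alternation in Source B)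
def pvTbl : List (List Char × List Char) :=
  [("&lt;/a&gt;&#10;".toList, "</a>\n".toList),
   ("&lt;a href=&quot;".toList, "<a href=\"".toList),
   ("&quot;&gt;".toList, "\">".toList),
   ("&lt;/a&gt;".toList, "</a>".toList),
   ("&lt;".toList, "<".toList),
   ("&gt;".toList, ">".toList),
   ("&quot;".toList, "\"".toList),
   ("&#10;".toList, "\n".toList),
   ("&#13;".toList, "\r".toList),
   ("&#9;".toList, "\t".toList),
   ("&amp;".toList, "&".toList)]

-- hand port of `_ENTITY_RE.sub(lambda m: _ENTITY_MAP[m.group(0)], text)`: for an alternation of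
-- literal patterns, re.sub is exactly the leftmost scan that tries the alternatives in order at
-- each position, emits the mapped replacement and resumes after the match — exact here.
def pvScan : List Char → List Char
  | [] => []
  | c :: t =>
    match pvTbl.find? (fun pr => pr.1.isPrefixOf (c :: t)) with
    | some (p, r) => r ++ pvScan (t.drop (p.length - 1))
    | none => c :: pvScan t
  termination_by s => s.length
  decreasing_by all_goals simp [List.length_drop] <;> omega

def clean_html_entities_in_attributes_alt (text : Option String) : Option String :=
  match text with
  | none => none
  | some s =>
    if s = "" then some s
    else some (String.ofList (pvScan s.toList))

-- ===== PRECONDITION & SPEC =====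
def Spec_clean_html_entities_in_attributes (text : Option String) (out : Option String) : Prop := out = clean_html_entities_in_attributes_alt text
instance (text : Option String) (out : Option String) : Decidable (Spec_clean_html_entities_in_attributes text out) := by unfold Spec_clean_html_entities_in_attributes; infer_instance

-- ===== CLAIM (what is proved, stated in full; the proofs are below) =====
def Claim_equal_clean_html_entities_in_attributes : Prop := ∀ (text : Option String), Dom_clean_html_entities_in_attributes text → Spec_clean_html_entities_in_attributes text (clean_html_entities_in_attributes text)

-- ===== LEMMAS AND PROOFS =====

-- structural characterisation of PySem.Chars.replace (single pattern, leftmost, non-overlapping)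
def pvRep (old nw : List Char) : List Char → List Char
  | [] => []
  | c :: t =>
    if old.isPrefixOf (c :: t) then nw ++ pvRep old nw (t.drop (old.length - 1))
    else c :: pvRep old nw t
  termination_by s => s.length
  decreasing_by all_goals simp [List.length_drop] <;> omega

theorem go_eq (old nw : List Char) (h : old ≠ []) :
    ∀ fuel l acc, l.length ≤ fuel →
      PySem.Chars.replace.go old nw fuel l acc = acc.reverse ++ pvRep old nw l := by
  intro fuel
  induction fuel with
  | zero =>
    intro l acc hl
    have : l = [] := List.eq_nil_of_length_eq_zero (Nat.le_zero.mp hl)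
    subst this; simp [PySem.Chars.replace.go, pvRep]
  | succ n ih =>
    intro l acc hl
    match l with
    | [] => simp [PySem.Chars.replace.go, pvRep]
    | c :: t =>
      rw [PySem.Chars.replace.go]
      by_cases hp : old.isPrefixOf (c :: t)
      · rw [if_pos hp, pvRep, if_pos hp]
        have h1 : 1 ≤ old.length := List.length_pos_of_ne_nil h
        have hlen : (List.drop old.length (c :: t)).length ≤ n := by
          simp at hl ⊢; omega
        have hd : List.drop old.length (c :: t) = t.drop (old.length - 1) := by
          cases old with
          | nil => exact absurd rfl h
          | cons o os => simp
        rw [ih _ _ hlen, hd]; simp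
      · rw [if_neg hp, pvRep, if_neg hp, ih t (c :: acc) (by simp at hl ⊢; omega)]
        simp

theorem pvRep_nil (old nw : List Char) : pvRep old nw [] = [] := by rw [pvRep]

theorem replace_eq_pvRep (s old nw : List Char) (h : old ≠ []) :
    PySem.Chars.replace s old nw = pvRep old nw s := by
  rw [PySem.Chars.replace, if_neg (by simpa using h)]
  simpa using go_eq old nw h s.length s [] le_rfl

-- the character alphabet of the entity patterns; no replacement (except the last) starts in it
def pvS : List Char :=
  ['&','l','t',';','/','a','g','#','1','0','q','u','o','3','9','m','p','h','r','e','f','=',' ']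

theorem head?_exists {α : Type} {l : List α} {a : α} (h : l.head? = some a) : ∃ t, l = a :: t := by
  cases l <;> simp_all

theorem no_prefix_of_append (a w : List Char) (h : ¬ a.take w.length <+: w) (X : List Char) :
    ¬ a <+: w ++ X := fun hp => h (by simpa [List.take_left] using hp.take w.length)

theorem pvRep_not_prefix (old nw : List Char) (c : Char) (t : List Char)
    (h : ¬ old <+: (c :: t)) : pvRep old nw (c :: t) = c :: pvRep old nw t := by
  rw [pvRep, if_neg (fun hb => h (List.isPrefixOf_iff_prefix.mp hb))]

theorem pvRep_head (c : Char) (q nw X : List Char) :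
    pvRep (c :: q) nw ((c :: q) ++ X) = nw ++ pvRep (c :: q) nw X := by
  rw [show (c :: q) ++ X = c :: (q ++ X) from rfl, pvRep,
    if_pos (List.isPrefixOf_iff_prefix.mpr (by simpa using List.prefix_append (c :: q) X))]
  simp

-- a pattern-alphabet word that does not occur in X does not occur in pvRep old nw X either,
-- when the replacement nw starts outside the alphabet
theorem pvRep_pres (old nw : List Char) (hn : nw ≠ []) (hh : ∀ h ∈ nw.head?, h ∉ pvS) :
    ∀ (X u : List Char), u ≠ [] → (∀ ch ∈ u, ch ∈ pvS) → ¬ u <+: X → ¬ u <+: pvRep old nw X := by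
  intro X
  induction X with
  | nil => intro u hu _ _ hp; rw [pvRep] at hp; exact hu (List.prefix_nil.mp hp)
  | cons c t ih =>
    intro u hu hS hnp hp
    by_cases hm : old <+: (c :: t)
    · rw [pvRep, if_pos (List.isPrefixOf_iff_prefix.mpr hm)] at hp
      match u, nw with
      | u0 :: u', n0 :: n' =>
        have := (List.cons_prefix_cons.mp hp).1
        exact hh n0 (by simp) (this ▸ hS u0 (by simp))
      | u0 :: u', [] => exact hn rfl
    · rw [pvRep_not_prefix old nw c t hm] at hp
      match u with
      | u0 :: u' =>
        obtain ⟨rfl, hp'⟩ := List.cons_prefix_cons.mp hp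
        match u' with
        | [] => exact hnp (by simp)
        | v :: u'' =>
          have : ¬ (v :: u'') <+: t := fun hvt => hnp (List.cons_prefix_cons.mpr ⟨rfl, hvt⟩)
          exact ih (v :: u'') (by simp) (fun ch hch => hS ch (by simp [hch])) this hp'

theorem pvRep_skip (old nw : List Char) :
    ∀ (w X : List Char), (∀ k, k < w.length → ¬ old <+: (w.drop k ++ X)) →
      pvRep old nw (w ++ X) = w ++ pvRep old nw X := by
  intro w
  induction w with
  | nil => intro X _; rfl
  | cons c w' ih =>
    intro X h
    rw [show (c :: w') ++ X = c :: (w' ++ X) from rfl,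
      pvRep_not_prefix old nw c (w' ++ X) (by simpa using h 0 (by simp)),
      ih X (fun k hk => by simpa using h (k + 1) (by simpa using hk))]
    rfl

def pvPass (L : List (List Char × List Char)) (s : List Char) : List Char :=
  L.foldl (fun s pr => pvRep pr.1 pr.2 s) s

-- every pattern is '&' followed by a nonempty pvS-word; every replacement except
-- possibly the last is nonempty, starts outside pvS and contains no '&'
def pvGood (L : List (List Char × List Char)) : Prop :=
  (∀ pr ∈ L, pr.1.head? = some '&' ∧ pr.1.tail ≠ [] ∧ ∀ ch ∈ pr.1.tail, ch ∈ pvS) ∧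
  (∀ pr ∈ L.dropLast, pr.2 ≠ [] ∧ (∀ h ∈ pr.2.head?, h ∉ pvS) ∧ '&' ∉ pr.2)

-- none of the patterns of L matches at the head: the head character passes through every pass
theorem pvPass_cons (L : List (List Char × List Char)) (hg : pvGood L) :
    ∀ (c : Char) (t : List Char), (∀ pr ∈ L, ¬ pr.1 <+: (c :: t)) →
      pvPass L (c :: t) = c :: pvPass L t := by
  induction L with
  | nil => intro c t _; rfl
  | cons pr L' ih =>
    intro c t h
    have h0 : ¬ pr.1 <+: (c :: t) := h pr (by simp)
    have step : pvPass (pr :: L') (c :: t) = pvPass L' (c :: pvRep pr.1 pr.2 t) := by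
      simp [pvPass, pvRep_not_prefix pr.1 pr.2 c t h0]
    rw [step]
    match L' with
    | [] => rfl
    | pr2 :: L'' =>
      have hmem : pr ∈ (pr :: pr2 :: L'').dropLast := by
        rw [List.dropLast_cons₂]; simp
      obtain ⟨hr_ne, hr_head, _⟩ := hg.2 pr hmem
      have hg' : pvGood (pr2 :: L'') :=
        ⟨fun x hx => hg.1 x (by simp [hx]),
         fun x hx => hg.2 x (by rw [List.dropLast_cons₂]; exact List.mem_cons_of_mem _ hx)⟩
      have hih := ih hg' c (pvRep pr.1 pr.2 t)
      rw [hih ?_, pvPass]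
      · rfl
      · intro pr' hpr'
        obtain ⟨hh', htl, hts⟩ := hg.1 pr' (List.mem_cons_of_mem _ hpr')
        obtain ⟨q', hq'eq⟩ := head?_exists hh'
        rw [hq'eq]
        intro hp
        obtain ⟨hc, hq'p⟩ := List.cons_prefix_cons.mp hp
        subst hc
        have hq'ne : q' ≠ [] := by rw [hq'eq] at htl; simpa using htl
        have hq'S : ∀ ch ∈ q', ch ∈ pvS := by
          intro ch hch; apply hts; rw [hq'eq]; simpa using hch
        have hnt : ¬ q' <+: t := by
          have := h pr' (List.mem_cons_of_mem _ hpr')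
          rw [hq'eq] at this
          exact fun hq => this (List.cons_prefix_cons.mpr ⟨rfl, hq⟩)
        exact pvRep_pres pr.1 pr.2 hr_ne hr_head t q' hq'ne hq'S hnt hq'p

-- passes listed before the matching pattern leave the matched prefix p intact
theorem pvPass_skip (p : List Char) (L₁ : List (List Char × List Char))
    (hrepl : ∀ pr ∈ L₁, pr.2 ≠ [] ∧ (∀ h ∈ pr.2.head?, h ∉ pvS))
    (hS : ∀ pr ∈ L₁, ∀ ch ∈ pr.1, ch ∈ pvS)
    (hk : ∀ pr ∈ L₁, ∀ k < p.length, 1 ≤ k → ¬ pr.1.take (p.length - k) <+: p.drop k)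
    (hd : ∀ pr ∈ L₁, p <+: pr.1 ∨ ¬ pr.1.take p.length <+: p) :
    ∀ X, (∀ pr ∈ L₁, ¬ pr.1 <+: p ++ X) → pvPass L₁ (p ++ X) = p ++ pvPass L₁ X := by
  induction L₁ with
  | nil => intro X _; rfl
  | cons pr L' ih =>
    intro X h
    have hstep : pvRep pr.1 pr.2 (p ++ X) = p ++ pvRep pr.1 pr.2 X := by
      apply pvRep_skip
      intro k hklt
      match k with
      | 0 => simpa using h pr (by simp)
      | k + 1 =>
        apply no_prefix_of_append
        have := hk pr (by simp) (k + 1) hklt (by omega)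
        simpa [List.length_drop] using this
    have hnext : ∀ pr' ∈ L', ¬ pr'.1 <+: p ++ pvRep pr.1 pr.2 X := by
      intro pr' hpr'
      rcases hd pr' (by simp [hpr']) with hpre | hnp
      · obtain ⟨u, hu⟩ := hpre
        rw [← hu]
        have hnp' : ¬ pr'.1 <+: p ++ X := h pr' (by simp [hpr'])
        rw [← hu] at hnp'
        have hu_ne : u ≠ [] := by
          rintro rfl
          exact hnp' (by simpa using List.prefix_append p X)
        have hu_not : ¬ u <+: X := fun hx =>
          hnp' ((List.prefix_append_right_inj p).mpr hx)
        have hu_S : ∀ ch ∈ u, ch ∈ pvS := fun ch hch =>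
          hS pr' (by simp [hpr']) ch (by rw [← hu]; simp [hch])
        obtain ⟨hr_ne, hr_head⟩ := hrepl pr (by simp)
        intro hx
        exact pvRep_pres pr.1 pr.2 hr_ne hr_head X u hu_ne hu_S hu_not
          ((List.prefix_append_right_inj p).mp hx)
      · exact no_prefix_of_append _ _ (by simpa using hnp) _
    calc pvPass (pr :: L') (p ++ X)
        = pvPass L' (p ++ pvRep pr.1 pr.2 X) := by simp [pvPass, hstep]
      _ = p ++ pvPass L' (pvRep pr.1 pr.2 X) := by
          exact ih (fun x hx => hrepl x (by simp [hx])) (fun x hx => hS x (by simp [hx]))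
            (fun x hx => hk x (by simp [hx])) (fun x hx => hd x (by simp [hx])) _ hnext
      _ = p ++ pvPass (pr :: L') X := by simp [pvPass]

-- later passes distribute over an '&'-free replacement prefix
theorem pvPass_repl (L₂ : List (List Char × List Char))
    (hpat : ∀ pr ∈ L₂, ∃ q, pr.1 = '&' :: q) (r : List Char) (hr : '&' ∉ r) :
    ∀ Y, pvPass L₂ (r ++ Y) = r ++ pvPass L₂ Y := by
  induction L₂ with
  | nil => intro Y; rfl
  | cons pr L' ih =>
    intro Y
    have hstep : pvRep pr.1 pr.2 (r ++ Y) = r ++ pvRep pr.1 pr.2 Y := by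
      apply pvRep_skip
      intro k hklt
      obtain ⟨q, hq⟩ := hpat pr (by simp)
      rw [hq]
      match hdrop : r.drop k with
      | [] =>
        exfalso
        have : (r.drop k).length = 0 := by rw [hdrop]; rfl
        rw [List.length_drop] at this
        omega
      | d :: ds =>
        intro hp
        have hd_mem : d ∈ r := by
          have : d ∈ r.drop k := by rw [hdrop]; simp
          exact List.mem_of_mem_drop this
        have := (List.cons_prefix_cons.mp (by simpa [hdrop] using hp)).1
        exact hr (this ▸ hd_mem)
    calc pvPass (pr :: L') (r ++ Y)
        = pvPass L' (r ++ pvRep pr.1 pr.2 Y) := by simp [pvPass, hstep]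
      _ = r ++ pvPass L' (pvRep pr.1 pr.2 Y) := ih (fun x hx => hpat x (by simp [hx])) _
      _ = r ++ pvPass (pr :: L') Y := by simp [pvPass]

-- the full pass sequence on p ++ t', when p is the first matching pattern:
-- replace p, keep everything before/after intact
theorem pvPass_decomp (L₁ L₂ : List (List Char × List Char)) (p r : List Char)
    (c : Char) (q : List Char) (hp : p = c :: q)
    (htbl : pvTbl = L₁ ++ (p, r) :: L₂)
    (hrepl : ∀ pr ∈ L₁, pr.2 ≠ [] ∧ (∀ h ∈ pr.2.head?, h ∉ pvS))
    (hS : ∀ pr ∈ L₁, ∀ ch ∈ pr.1, ch ∈ pvS)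
    (hk : ∀ pr ∈ L₁, ∀ k < p.length, 1 ≤ k → ¬ pr.1.take (p.length - k) <+: p.drop k)
    (hd : ∀ pr ∈ L₁, p <+: pr.1 ∨ ¬ pr.1.take p.length <+: p)
    (hpat₂ : ∀ pr ∈ L₂, ∃ qq, pr.1 = '&' :: qq)
    (hr : L₂ ≠ [] → '&' ∉ r)
    (t' : List Char) (h : ∀ pr ∈ L₁, ¬ pr.1 <+: p ++ t') :
    pvPass pvTbl (p ++ t') = r ++ pvPass pvTbl t' := by
  rw [htbl]
  have e1 : ∀ s, pvPass (L₁ ++ (p, r) :: L₂) s = pvPass L₂ (pvRep p r (pvPass L₁ s)) := by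
    intro s; simp [pvPass, List.foldl_append]
  rw [e1, e1, pvPass_skip p L₁ hrepl hS hk hd t' h, hp, pvRep_head, ← hp]
  match L₂ with
  | [] => rfl
  | pr2 :: L₂' => rw [pvPass_repl (pr2 :: L₂') hpat₂ r (hr (by simp))]

-- the scanner on p ++ t', when p is the first matching pattern
theorem pvScan_match (p r : List Char) (c : Char) (q : List Char) (hp : p = c :: q)
    (L₁ L₂ : List (List Char × List Char)) (htbl : pvTbl = L₁ ++ (p, r) :: L₂)
    (t' : List Char) (h : ∀ pr ∈ L₁, ¬ pr.1 <+: p ++ t') :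
    pvScan (p ++ t') = r ++ pvScan t' := by
  subst hp
  rw [show (c :: q) ++ t' = c :: (q ++ t') from rfl, pvScan]
  have hfind : pvTbl.find? (fun pr => pr.1.isPrefixOf (c :: (q ++ t'))) = some ((c :: q), r) := by
    rw [htbl, List.find?_append]
    have h1 : L₁.find? (fun pr => pr.1.isPrefixOf (c :: (q ++ t'))) = none :=
      List.find?_eq_none.mpr (fun x hx => by
        simpa [List.isPrefixOf_iff_prefix] using h x hx)
    rw [h1, List.find?_cons_of_pos (by
      simpa [List.isPrefixOf_iff_prefix] using List.prefix_append (c :: q) t')]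
    rfl
  rw [hfind]
  show r ++ pvScan ((q ++ t').drop ((c :: q).length - 1)) = r ++ pvScan t'
  have : (q ++ t').drop ((c :: q).length - 1) = t' := by
    simpa using List.drop_left q t'
  rw [this]

theorem pvTbl_good : pvGood pvTbl := by
  unfold pvGood
  constructor <;> simp [pvS, pvTbl]

-- the eleven sequential passes compute exactly the single left-to-right scan
theorem pvPass_eq_pvScan : ∀ (n : Nat) (s : List Char), s.length ≤ n →
    pvPass pvTbl s = pvScan s := by
  intro n
  induction n with
  | zero =>
    intro s hs
    have : s = [] := List.eq_nil_of_length_eq_zero (Nat.le_zero.mp hs)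
    subst this
    have hnil : pvPass pvTbl [] = [] := by simp [pvPass, pvTbl, pvRep_nil]
    rw [hnil, pvScan]
  | succ n ih =>
    intro s hsn
    match s with
    | [] =>
      have hnil : pvPass pvTbl [] = [] := by simp [pvPass, pvTbl, pvRep_nil]
      rw [hnil, pvScan]
    | c :: t =>
    by_cases h1 : ("&lt;/a&gt;&#10;".toList) <+: (c :: t)
    · -- pattern 1 ("&lt;/a&gt;&#10;") is the first match
      obtain ⟨t', hs⟩ := h1
      have hlen' : t'.length ≤ n := by
        have hlc := congrArg List.length hs
        simp at hlc hsn
        omega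
      rw [← hs]
      have htbl : pvTbl = [] ++ ("&lt;/a&gt;&#10;".toList, "</a>\n".toList) :: [("&lt;a href=&quot;".toList, "<a href=\"".toList), ("&quot;&gt;".toList, "\">".toList), ("&lt;/a&gt;".toList, "</a>".toList), ("&lt;".toList, "<".toList), ("&gt;".toList, ">".toList), ("&quot;".toList, "\"".toList), ("&#10;".toList, "\n".toList), ("&#13;".toList, "\r".toList), ("&#9;".toList, "\t".toList), ("&amp;".toList, "&".toList)] := by rfl
      have hmem : ∀ pr ∈ ([] : List (List Char × List Char)), ¬ pr.1 <+: "&lt;/a&gt;&#10;".toList ++ t' := by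
        intro pr hpr; simp at hpr
      have hpat2 : ∀ pr ∈ ([("&lt;a href=&quot;".toList, "<a href=\"".toList), ("&quot;&gt;".toList, "\">".toList), ("&lt;/a&gt;".toList, "</a>".toList), ("&lt;".toList, "<".toList), ("&gt;".toList, ">".toList), ("&quot;".toList, "\"".toList), ("&#10;".toList, "\n".toList), ("&#13;".toList, "\r".toList), ("&#9;".toList, "\t".toList), ("&amp;".toList, "&".toList)] : List (List Char × List Char)), pr.1.head? = some '&' := by decide
      rw [pvPass_decomp [] [("&lt;a href=&quot;".toList, "<a href=\"".toList), ("&quot;&gt;".toList, "\">".toList), ("&lt;/a&gt;".toList, "</a>".toList), ("&lt;".toList, "<".toList), ("&gt;".toList, ">".toList), ("&quot;".toList, "\"".toList), ("&#10;".toList, "\n".toList), ("&#13;".toList, "\r".toList), ("&#9;".toList, "\t".toList), ("&amp;".toList, "&".toList)] "&lt;/a&gt;&#10;".toList "</a>\n".toList '&' "lt;/a&gt;&#10;".toList rfl htbl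
            (by simp [pvS]) (by simp [pvS]) (by decide) (by decide)
            (fun pr hpr => head?_exists (hpat2 pr hpr)) (by decide) t' hmem,
          pvScan_match "&lt;/a&gt;&#10;".toList "</a>\n".toList '&' "lt;/a&gt;&#10;".toList rfl [] [("&lt;a href=&quot;".toList, "<a href=\"".toList), ("&quot;&gt;".toList, "\">".toList), ("&lt;/a&gt;".toList, "</a>".toList), ("&lt;".toList, "<".toList), ("&gt;".toList, ">".toList), ("&quot;".toList, "\"".toList), ("&#10;".toList, "\n".toList), ("&#13;".toList, "\r".toList), ("&#9;".toList, "\t".toList), ("&amp;".toList, "&".toList)] htbl t' hmem,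
          ih t' hlen']
    by_cases h2 : ("&lt;a href=&quot;".toList) <+: (c :: t)
    · -- pattern 2 ("&lt;a href=&quot;") is the first match
      obtain ⟨t', hs⟩ := h2
      have hlen' : t'.length ≤ n := by
        have hlc := congrArg List.length hs
        simp at hlc hsn
        omega
      rw [← hs]
      have htbl : pvTbl = [("&lt;/a&gt;&#10;".toList, "</a>\n".toList)] ++ ("&lt;a href=&quot;".toList, "<a href=\"".toList) :: [("&quot;&gt;".toList, "\">".toList), ("&lt;/a&gt;".toList, "</a>".toList), ("&lt;".toList, "<".toList), ("&gt;".toList, ">".toList), ("&quot;".toList, "\"".toList), ("&#10;".toList, "\n".toList), ("&#13;".toList, "\r".toList), ("&#9;".toList, "\t".toList), ("&amp;".toList, "&".toList)] := by rfl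
      have hmem : ∀ pr ∈ ([("&lt;/a&gt;&#10;".toList, "</a>\n".toList)] : List (List Char × List Char)), ¬ pr.1 <+: "&lt;a href=&quot;".toList ++ t' := by
        intro pr hpr
        simp only [List.mem_cons, List.not_mem_nil, or_false] at hpr
        rw [hs]
        rcases hpr with rfl
        exacts [h1]
      have hpat2 : ∀ pr ∈ ([("&quot;&gt;".toList, "\">".toList), ("&lt;/a&gt;".toList, "</a>".toList), ("&lt;".toList, "<".toList), ("&gt;".toList, ">".toList), ("&quot;".toList, "\"".toList), ("&#10;".toList, "\n".toList), ("&#13;".toList, "\r".toList), ("&#9;".toList, "\t".toList), ("&amp;".toList, "&".toList)] : List (List Char × List Char)), pr.1.head? = some '&' := by decide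
      rw [pvPass_decomp [("&lt;/a&gt;&#10;".toList, "</a>\n".toList)] [("&quot;&gt;".toList, "\">".toList), ("&lt;/a&gt;".toList, "</a>".toList), ("&lt;".toList, "<".toList), ("&gt;".toList, ">".toList), ("&quot;".toList, "\"".toList), ("&#10;".toList, "\n".toList), ("&#13;".toList, "\r".toList), ("&#9;".toList, "\t".toList), ("&amp;".toList, "&".toList)] "&lt;a href=&quot;".toList "<a href=\"".toList '&' "lt;a href=&quot;".toList rfl htbl
            (by simp [pvS]) (by simp [pvS]) (by decide) (by decide)
            (fun pr hpr => head?_exists (hpat2 pr hpr)) (by decide) t' hmem,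
          pvScan_match "&lt;a href=&quot;".toList "<a href=\"".toList '&' "lt;a href=&quot;".toList rfl [("&lt;/a&gt;&#10;".toList, "</a>\n".toList)] [("&quot;&gt;".toList, "\">".toList), ("&lt;/a&gt;".toList, "</a>".toList), ("&lt;".toList, "<".toList), ("&gt;".toList, ">".toList), ("&quot;".toList, "\"".toList), ("&#10;".toList, "\n".toList), ("&#13;".toList, "\r".toList), ("&#9;".toList, "\t".toList), ("&amp;".toList, "&".toList)] htbl t' hmem,
          ih t' hlen']
    by_cases h3 : ("&quot;&gt;".toList) <+: (c :: t)
    · -- pattern 3 ("&quot;&gt;") is the first match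
      obtain ⟨t', hs⟩ := h3
      have hlen' : t'.length ≤ n := by
        have hlc := congrArg List.length hs
        simp at hlc hsn
        omega
      rw [← hs]
      have htbl : pvTbl = [("&lt;/a&gt;&#10;".toList, "</a>\n".toList), ("&lt;a href=&quot;".toList, "<a href=\"".toList)] ++ ("&quot;&gt;".toList, "\">".toList) :: [("&lt;/a&gt;".toList, "</a>".toList), ("&lt;".toList, "<".toList), ("&gt;".toList, ">".toList), ("&quot;".toList, "\"".toList), ("&#10;".toList, "\n".toList), ("&#13;".toList, "\r".toList), ("&#9;".toList, "\t".toList), ("&amp;".toList, "&".toList)] := by rfl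
      have hmem : ∀ pr ∈ ([("&lt;/a&gt;&#10;".toList, "</a>\n".toList), ("&lt;a href=&quot;".toList, "<a href=\"".toList)] : List (List Char × List Char)), ¬ pr.1 <+: "&quot;&gt;".toList ++ t' := by
        intro pr hpr
        simp only [List.mem_cons, List.not_mem_nil, or_false] at hpr
        rw [hs]
        rcases hpr with rfl | rfl
        exacts [h1, h2]
      have hpat2 : ∀ pr ∈ ([("&lt;/a&gt;".toList, "</a>".toList), ("&lt;".toList, "<".toList), ("&gt;".toList, ">".toList), ("&quot;".toList, "\"".toList), ("&#10;".toList, "\n".toList), ("&#13;".toList, "\r".toList), ("&#9;".toList, "\t".toList), ("&amp;".toList, "&".toList)] : List (List Char × List Char)), pr.1.head? = some '&' := by decide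
      rw [pvPass_decomp [("&lt;/a&gt;&#10;".toList, "</a>\n".toList), ("&lt;a href=&quot;".toList, "<a href=\"".toList)] [("&lt;/a&gt;".toList, "</a>".toList), ("&lt;".toList, "<".toList), ("&gt;".toList, ">".toList), ("&quot;".toList, "\"".toList), ("&#10;".toList, "\n".toList), ("&#13;".toList, "\r".toList), ("&#9;".toList, "\t".toList), ("&amp;".toList, "&".toList)] "&quot;&gt;".toList "\">".toList '&' "quot;&gt;".toList rfl htbl
            (by simp [pvS]) (by simp [pvS]) (by decide) (by decide)
            (fun pr hpr => head?_exists (hpat2 pr hpr)) (by decide) t' hmem,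
          pvScan_match "&quot;&gt;".toList "\">".toList '&' "quot;&gt;".toList rfl [("&lt;/a&gt;&#10;".toList, "</a>\n".toList), ("&lt;a href=&quot;".toList, "<a href=\"".toList)] [("&lt;/a&gt;".toList, "</a>".toList), ("&lt;".toList, "<".toList), ("&gt;".toList, ">".toList), ("&quot;".toList, "\"".toList), ("&#10;".toList, "\n".toList), ("&#13;".toList, "\r".toList), ("&#9;".toList, "\t".toList), ("&amp;".toList, "&".toList)] htbl t' hmem,
          ih t' hlen']
    by_cases h4 : ("&lt;/a&gt;".toList) <+: (c :: t)
    · -- pattern 4 ("&lt;/a&gt;") is the first match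
      obtain ⟨t', hs⟩ := h4
      have hlen' : t'.length ≤ n := by
        have hlc := congrArg List.length hs
        simp at hlc hsn
        omega
      rw [← hs]
      have htbl : pvTbl = [("&lt;/a&gt;&#10;".toList, "</a>\n".toList), ("&lt;a href=&quot;".toList, "<a href=\"".toList), ("&quot;&gt;".toList, "\">".toList)] ++ ("&lt;/a&gt;".toList, "</a>".toList) :: [("&lt;".toList, "<".toList), ("&gt;".toList, ">".toList), ("&quot;".toList, "\"".toList), ("&#10;".toList, "\n".toList), ("&#13;".toList, "\r".toList), ("&#9;".toList, "\t".toList), ("&amp;".toList, "&".toList)] := by rfl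
      have hmem : ∀ pr ∈ ([("&lt;/a&gt;&#10;".toList, "</a>\n".toList), ("&lt;a href=&quot;".toList, "<a href=\"".toList), ("&quot;&gt;".toList, "\">".toList)] : List (List Char × List Char)), ¬ pr.1 <+: "&lt;/a&gt;".toList ++ t' := by
        intro pr hpr
        simp only [List.mem_cons, List.not_mem_nil, or_false] at hpr
        rw [hs]
        rcases hpr with rfl | rfl | rfl
        exacts [h1, h2, h3]
      have hpat2 : ∀ pr ∈ ([("&lt;".toList, "<".toList), ("&gt;".toList, ">".toList), ("&quot;".toList, "\"".toList), ("&#10;".toList, "\n".toList), ("&#13;".toList, "\r".toList), ("&#9;".toList, "\t".toList), ("&amp;".toList, "&".toList)] : List (List Char × List Char)), pr.1.head? = some '&' := by decide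
      rw [pvPass_decomp [("&lt;/a&gt;&#10;".toList, "</a>\n".toList), ("&lt;a href=&quot;".toList, "<a href=\"".toList), ("&quot;&gt;".toList, "\">".toList)] [("&lt;".toList, "<".toList), ("&gt;".toList, ">".toList), ("&quot;".toList, "\"".toList), ("&#10;".toList, "\n".toList), ("&#13;".toList, "\r".toList), ("&#9;".toList, "\t".toList), ("&amp;".toList, "&".toList)] "&lt;/a&gt;".toList "</a>".toList '&' "lt;/a&gt;".toList rfl htbl
            (by simp [pvS]) (by simp [pvS]) (by decide) (by decide)
            (fun pr hpr => head?_exists (hpat2 pr hpr)) (by decide) t' hmem,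
          pvScan_match "&lt;/a&gt;".toList "</a>".toList '&' "lt;/a&gt;".toList rfl [("&lt;/a&gt;&#10;".toList, "</a>\n".toList), ("&lt;a href=&quot;".toList, "<a href=\"".toList), ("&quot;&gt;".toList, "\">".toList)] [("&lt;".toList, "<".toList), ("&gt;".toList, ">".toList), ("&quot;".toList, "\"".toList), ("&#10;".toList, "\n".toList), ("&#13;".toList, "\r".toList), ("&#9;".toList, "\t".toList), ("&amp;".toList, "&".toList)] htbl t' hmem,
          ih t' hlen']
    by_cases h5 : ("&lt;".toList) <+: (c :: t)
    · -- pattern 5 ("&lt;") is the first match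
      obtain ⟨t', hs⟩ := h5
      have hlen' : t'.length ≤ n := by
        have hlc := congrArg List.length hs
        simp at hlc hsn
        omega
      rw [← hs]
      have htbl : pvTbl = [("&lt;/a&gt;&#10;".toList, "</a>\n".toList), ("&lt;a href=&quot;".toList, "<a href=\"".toList), ("&quot;&gt;".toList, "\">".toList), ("&lt;/a&gt;".toList, "</a>".toList)] ++ ("&lt;".toList, "<".toList) :: [("&gt;".toList, ">".toList), ("&quot;".toList, "\"".toList), ("&#10;".toList, "\n".toList), ("&#13;".toList, "\r".toList), ("&#9;".toList, "\t".toList), ("&amp;".toList, "&".toList)] := by rfl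
      have hmem : ∀ pr ∈ ([("&lt;/a&gt;&#10;".toList, "</a>\n".toList), ("&lt;a href=&quot;".toList, "<a href=\"".toList), ("&quot;&gt;".toList, "\">".toList), ("&lt;/a&gt;".toList, "</a>".toList)] : List (List Char × List Char)), ¬ pr.1 <+: "&lt;".toList ++ t' := by
        intro pr hpr
        simp only [List.mem_cons, List.not_mem_nil, or_false] at hpr
        rw [hs]
        rcases hpr with rfl | rfl | rfl | rfl
        exacts [h1, h2, h3, h4]
      have hpat2 : ∀ pr ∈ ([("&gt;".toList, ">".toList), ("&quot;".toList, "\"".toList), ("&#10;".toList, "\n".toList), ("&#13;".toList, "\r".toList), ("&#9;".toList, "\t".toList), ("&amp;".toList, "&".toList)] : List (List Char × List Char)), pr.1.head? = some '&' := by decide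
      rw [pvPass_decomp [("&lt;/a&gt;&#10;".toList, "</a>\n".toList), ("&lt;a href=&quot;".toList, "<a href=\"".toList), ("&quot;&gt;".toList, "\">".toList), ("&lt;/a&gt;".toList, "</a>".toList)] [("&gt;".toList, ">".toList), ("&quot;".toList, "\"".toList), ("&#10;".toList, "\n".toList), ("&#13;".toList, "\r".toList), ("&#9;".toList, "\t".toList), ("&amp;".toList, "&".toList)] "&lt;".toList "<".toList '&' "lt;".toList rfl htbl
            (by simp [pvS]) (by simp [pvS]) (by decide) (by decide)
            (fun pr hpr => head?_exists (hpat2 pr hpr)) (by decide) t' hmem,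
          pvScan_match "&lt;".toList "<".toList '&' "lt;".toList rfl [("&lt;/a&gt;&#10;".toList, "</a>\n".toList), ("&lt;a href=&quot;".toList, "<a href=\"".toList), ("&quot;&gt;".toList, "\">".toList), ("&lt;/a&gt;".toList, "</a>".toList)] [("&gt;".toList, ">".toList), ("&quot;".toList, "\"".toList), ("&#10;".toList, "\n".toList), ("&#13;".toList, "\r".toList), ("&#9;".toList, "\t".toList), ("&amp;".toList, "&".toList)] htbl t' hmem,
          ih t' hlen']
    by_cases h6 : ("&gt;".toList) <+: (c :: t)
    · -- pattern 6 ("&gt;") is the first match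
      obtain ⟨t', hs⟩ := h6
      have hlen' : t'.length ≤ n := by
        have hlc := congrArg List.length hs
        simp at hlc hsn
        omega
      rw [← hs]
      have htbl : pvTbl = [("&lt;/a&gt;&#10;".toList, "</a>\n".toList), ("&lt;a href=&quot;".toList, "<a href=\"".toList), ("&quot;&gt;".toList, "\">".toList), ("&lt;/a&gt;".toList, "</a>".toList), ("&lt;".toList, "<".toList)] ++ ("&gt;".toList, ">".toList) :: [("&quot;".toList, "\"".toList), ("&#10;".toList, "\n".toList), ("&#13;".toList, "\r".toList), ("&#9;".toList, "\t".toList), ("&amp;".toList, "&".toList)] := by rfl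
      have hmem : ∀ pr ∈ ([("&lt;/a&gt;&#10;".toList, "</a>\n".toList), ("&lt;a href=&quot;".toList, "<a href=\"".toList), ("&quot;&gt;".toList, "\">".toList), ("&lt;/a&gt;".toList, "</a>".toList), ("&lt;".toList, "<".toList)] : List (List Char × List Char)), ¬ pr.1 <+: "&gt;".toList ++ t' := by
        intro pr hpr
        simp only [List.mem_cons, List.not_mem_nil, or_false] at hpr
        rw [hs]
        rcases hpr with rfl | rfl | rfl | rfl | rfl
        exacts [h1, h2, h3, h4, h5]
      have hpat2 : ∀ pr ∈ ([("&quot;".toList, "\"".toList), ("&#10;".toList, "\n".toList), ("&#13;".toList, "\r".toList), ("&#9;".toList, "\t".toList), ("&amp;".toList, "&".toList)] : List (List Char × List Char)), pr.1.head? = some '&' := by decide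
      rw [pvPass_decomp [("&lt;/a&gt;&#10;".toList, "</a>\n".toList), ("&lt;a href=&quot;".toList, "<a href=\"".toList), ("&quot;&gt;".toList, "\">".toList), ("&lt;/a&gt;".toList, "</a>".toList), ("&lt;".toList, "<".toList)] [("&quot;".toList, "\"".toList), ("&#10;".toList, "\n".toList), ("&#13;".toList, "\r".toList), ("&#9;".toList, "\t".toList), ("&amp;".toList, "&".toList)] "&gt;".toList ">".toList '&' "gt;".toList rfl htbl
            (by simp [pvS]) (by simp [pvS]) (by decide) (by decide)
            (fun pr hpr => head?_exists (hpat2 pr hpr)) (by decide) t' hmem,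
          pvScan_match "&gt;".toList ">".toList '&' "gt;".toList rfl [("&lt;/a&gt;&#10;".toList, "</a>\n".toList), ("&lt;a href=&quot;".toList, "<a href=\"".toList), ("&quot;&gt;".toList, "\">".toList), ("&lt;/a&gt;".toList, "</a>".toList), ("&lt;".toList, "<".toList)] [("&quot;".toList, "\"".toList), ("&#10;".toList, "\n".toList), ("&#13;".toList, "\r".toList), ("&#9;".toList, "\t".toList), ("&amp;".toList, "&".toList)] htbl t' hmem,
          ih t' hlen']
    by_cases h7 : ("&quot;".toList) <+: (c :: t)
    · -- pattern 7 ("&quot;") is the first match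
      obtain ⟨t', hs⟩ := h7
      have hlen' : t'.length ≤ n := by
        have hlc := congrArg List.length hs
        simp at hlc hsn
        omega
      rw [← hs]
      have htbl : pvTbl = [("&lt;/a&gt;&#10;".toList, "</a>\n".toList), ("&lt;a href=&quot;".toList, "<a href=\"".toList), ("&quot;&gt;".toList, "\">".toList), ("&lt;/a&gt;".toList, "</a>".toList), ("&lt;".toList, "<".toList), ("&gt;".toList, ">".toList)] ++ ("&quot;".toList, "\"".toList) :: [("&#10;".toList, "\n".toList), ("&#13;".toList, "\r".toList), ("&#9;".toList, "\t".toList), ("&amp;".toList, "&".toList)] := by rfl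
      have hmem : ∀ pr ∈ ([("&lt;/a&gt;&#10;".toList, "</a>\n".toList), ("&lt;a href=&quot;".toList, "<a href=\"".toList), ("&quot;&gt;".toList, "\">".toList), ("&lt;/a&gt;".toList, "</a>".toList), ("&lt;".toList, "<".toList), ("&gt;".toList, ">".toList)] : List (List Char × List Char)), ¬ pr.1 <+: "&quot;".toList ++ t' := by
        intro pr hpr
        simp only [List.mem_cons, List.not_mem_nil, or_false] at hpr
        rw [hs]
        rcases hpr with rfl | rfl | rfl | rfl | rfl | rfl
        exacts [h1, h2, h3, h4, h5, h6]
      have hpat2 : ∀ pr ∈ ([("&#10;".toList, "\n".toList), ("&#13;".toList, "\r".toList), ("&#9;".toList, "\t".toList), ("&amp;".toList, "&".toList)] : List (List Char × List Char)), pr.1.head? = some '&' := by decide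
      rw [pvPass_decomp [("&lt;/a&gt;&#10;".toList, "</a>\n".toList), ("&lt;a href=&quot;".toList, "<a href=\"".toList), ("&quot;&gt;".toList, "\">".toList), ("&lt;/a&gt;".toList, "</a>".toList), ("&lt;".toList, "<".toList), ("&gt;".toList, ">".toList)] [("&#10;".toList, "\n".toList), ("&#13;".toList, "\r".toList), ("&#9;".toList, "\t".toList), ("&amp;".toList, "&".toList)] "&quot;".toList "\"".toList '&' "quot;".toList rfl htbl
            (by simp [pvS]) (by simp [pvS]) (by decide) (by decide)
            (fun pr hpr => head?_exists (hpat2 pr hpr)) (by decide) t' hmem,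
          pvScan_match "&quot;".toList "\"".toList '&' "quot;".toList rfl [("&lt;/a&gt;&#10;".toList, "</a>\n".toList), ("&lt;a href=&quot;".toList, "<a href=\"".toList), ("&quot;&gt;".toList, "\">".toList), ("&lt;/a&gt;".toList, "</a>".toList), ("&lt;".toList, "<".toList), ("&gt;".toList, ">".toList)] [("&#10;".toList, "\n".toList), ("&#13;".toList, "\r".toList), ("&#9;".toList, "\t".toList), ("&amp;".toList, "&".toList)] htbl t' hmem,
          ih t' hlen']
    by_cases h8 : ("&#10;".toList) <+: (c :: t)
    · -- pattern 8 ("&#10;") is the first match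
      obtain ⟨t', hs⟩ := h8
      have hlen' : t'.length ≤ n := by
        have hlc := congrArg List.length hs
        simp at hlc hsn
        omega
      rw [← hs]
      have htbl : pvTbl = [("&lt;/a&gt;&#10;".toList, "</a>\n".toList), ("&lt;a href=&quot;".toList, "<a href=\"".toList), ("&quot;&gt;".toList, "\">".toList), ("&lt;/a&gt;".toList, "</a>".toList), ("&lt;".toList, "<".toList), ("&gt;".toList, ">".toList), ("&quot;".toList, "\"".toList)] ++ ("&#10;".toList, "\n".toList) :: [("&#13;".toList, "\r".toList), ("&#9;".toList, "\t".toList), ("&amp;".toList, "&".toList)] := by rfl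
      have hmem : ∀ pr ∈ ([("&lt;/a&gt;&#10;".toList, "</a>\n".toList), ("&lt;a href=&quot;".toList, "<a href=\"".toList), ("&quot;&gt;".toList, "\">".toList), ("&lt;/a&gt;".toList, "</a>".toList), ("&lt;".toList, "<".toList), ("&gt;".toList, ">".toList), ("&quot;".toList, "\"".toList)] : List (List Char × List Char)), ¬ pr.1 <+: "&#10;".toList ++ t' := by
        intro pr hpr
        simp only [List.mem_cons, List.not_mem_nil, or_false] at hpr
        rw [hs]
        rcases hpr with rfl | rfl | rfl | rfl | rfl | rfl | rfl
        exacts [h1, h2, h3, h4, h5, h6, h7]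
      have hpat2 : ∀ pr ∈ ([("&#13;".toList, "\r".toList), ("&#9;".toList, "\t".toList), ("&amp;".toList, "&".toList)] : List (List Char × List Char)), pr.1.head? = some '&' := by decide
      rw [pvPass_decomp [("&lt;/a&gt;&#10;".toList, "</a>\n".toList), ("&lt;a href=&quot;".toList, "<a href=\"".toList), ("&quot;&gt;".toList, "\">".toList), ("&lt;/a&gt;".toList, "</a>".toList), ("&lt;".toList, "<".toList), ("&gt;".toList, ">".toList), ("&quot;".toList, "\"".toList)] [("&#13;".toList, "\r".toList), ("&#9;".toList, "\t".toList), ("&amp;".toList, "&".toList)] "&#10;".toList "\n".toList '&' "#10;".toList rfl htbl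
            (by simp [pvS]) (by simp [pvS]) (by decide) (by decide)
            (fun pr hpr => head?_exists (hpat2 pr hpr)) (by decide) t' hmem,
          pvScan_match "&#10;".toList "\n".toList '&' "#10;".toList rfl [("&lt;/a&gt;&#10;".toList, "</a>\n".toList), ("&lt;a href=&quot;".toList, "<a href=\"".toList), ("&quot;&gt;".toList, "\">".toList), ("&lt;/a&gt;".toList, "</a>".toList), ("&lt;".toList, "<".toList), ("&gt;".toList, ">".toList), ("&quot;".toList, "\"".toList)] [("&#13;".toList, "\r".toList), ("&#9;".toList, "\t".toList), ("&amp;".toList, "&".toList)] htbl t' hmem,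
          ih t' hlen']
    by_cases h9 : ("&#13;".toList) <+: (c :: t)
    · -- pattern 9 ("&#13;") is the first match
      obtain ⟨t', hs⟩ := h9
      have hlen' : t'.length ≤ n := by
        have hlc := congrArg List.length hs
        simp at hlc hsn
        omega
      rw [← hs]
      have htbl : pvTbl = [("&lt;/a&gt;&#10;".toList, "</a>\n".toList), ("&lt;a href=&quot;".toList, "<a href=\"".toList), ("&quot;&gt;".toList, "\">".toList), ("&lt;/a&gt;".toList, "</a>".toList), ("&lt;".toList, "<".toList), ("&gt;".toList, ">".toList), ("&quot;".toList, "\"".toList), ("&#10;".toList, "\n".toList)] ++ ("&#13;".toList, "\r".toList) :: [("&#9;".toList, "\t".toList), ("&amp;".toList, "&".toList)] := by rfl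
      have hmem : ∀ pr ∈ ([("&lt;/a&gt;&#10;".toList, "</a>\n".toList), ("&lt;a href=&quot;".toList, "<a href=\"".toList), ("&quot;&gt;".toList, "\">".toList), ("&lt;/a&gt;".toList, "</a>".toList), ("&lt;".toList, "<".toList), ("&gt;".toList, ">".toList), ("&quot;".toList, "\"".toList), ("&#10;".toList, "\n".toList)] : List (List Char × List Char)), ¬ pr.1 <+: "&#13;".toList ++ t' := by
        intro pr hpr
        simp only [List.mem_cons, List.not_mem_nil, or_false] at hpr
        rw [hs]
        rcases hpr with rfl | rfl | rfl | rfl | rfl | rfl | rfl | rfl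
        exacts [h1, h2, h3, h4, h5, h6, h7, h8]
      have hpat2 : ∀ pr ∈ ([("&#9;".toList, "\t".toList), ("&amp;".toList, "&".toList)] : List (List Char × List Char)), pr.1.head? = some '&' := by decide
      rw [pvPass_decomp [("&lt;/a&gt;&#10;".toList, "</a>\n".toList), ("&lt;a href=&quot;".toList, "<a href=\"".toList), ("&quot;&gt;".toList, "\">".toList), ("&lt;/a&gt;".toList, "</a>".toList), ("&lt;".toList, "<".toList), ("&gt;".toList, ">".toList), ("&quot;".toList, "\"".toList), ("&#10;".toList, "\n".toList)] [("&#9;".toList, "\t".toList), ("&amp;".toList, "&".toList)] "&#13;".toList "\r".toList '&' "#13;".toList rfl htbl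
            (by simp [pvS]) (by simp [pvS]) (by decide) (by decide)
            (fun pr hpr => head?_exists (hpat2 pr hpr)) (by decide) t' hmem,
          pvScan_match "&#13;".toList "\r".toList '&' "#13;".toList rfl [("&lt;/a&gt;&#10;".toList, "</a>\n".toList), ("&lt;a href=&quot;".toList, "<a href=\"".toList), ("&quot;&gt;".toList, "\">".toList), ("&lt;/a&gt;".toList, "</a>".toList), ("&lt;".toList, "<".toList), ("&gt;".toList, ">".toList), ("&quot;".toList, "\"".toList), ("&#10;".toList, "\n".toList)] [("&#9;".toList, "\t".toList), ("&amp;".toList, "&".toList)] htbl t' hmem,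
          ih t' hlen']
    by_cases h10 : ("&#9;".toList) <+: (c :: t)
    · -- pattern 10 ("&#9;") is the first match
      obtain ⟨t', hs⟩ := h10
      have hlen' : t'.length ≤ n := by
        have hlc := congrArg List.length hs
        simp at hlc hsn
        omega
      rw [← hs]
      have htbl : pvTbl = [("&lt;/a&gt;&#10;".toList, "</a>\n".toList), ("&lt;a href=&quot;".toList, "<a href=\"".toList), ("&quot;&gt;".toList, "\">".toList), ("&lt;/a&gt;".toList, "</a>".toList), ("&lt;".toList, "<".toList), ("&gt;".toList, ">".toList), ("&quot;".toList, "\"".toList), ("&#10;".toList, "\n".toList), ("&#13;".toList, "\r".toList)] ++ ("&#9;".toList, "\t".toList) :: [("&amp;".toList, "&".toList)] := by rfl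
      have hmem : ∀ pr ∈ ([("&lt;/a&gt;&#10;".toList, "</a>\n".toList), ("&lt;a href=&quot;".toList, "<a href=\"".toList), ("&quot;&gt;".toList, "\">".toList), ("&lt;/a&gt;".toList, "</a>".toList), ("&lt;".toList, "<".toList), ("&gt;".toList, ">".toList), ("&quot;".toList, "\"".toList), ("&#10;".toList, "\n".toList), ("&#13;".toList, "\r".toList)] : List (List Char × List Char)), ¬ pr.1 <+: "&#9;".toList ++ t' := by
        intro pr hpr
        simp only [List.mem_cons, List.not_mem_nil, or_false] at hpr
        rw [hs]
        rcases hpr with rfl | rfl | rfl | rfl | rfl | rfl | rfl | rfl | rfl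
        exacts [h1, h2, h3, h4, h5, h6, h7, h8, h9]
      have hpat2 : ∀ pr ∈ ([("&amp;".toList, "&".toList)] : List (List Char × List Char)), pr.1.head? = some '&' := by decide
      rw [pvPass_decomp [("&lt;/a&gt;&#10;".toList, "</a>\n".toList), ("&lt;a href=&quot;".toList, "<a href=\"".toList), ("&quot;&gt;".toList, "\">".toList), ("&lt;/a&gt;".toList, "</a>".toList), ("&lt;".toList, "<".toList), ("&gt;".toList, ">".toList), ("&quot;".toList, "\"".toList), ("&#10;".toList, "\n".toList), ("&#13;".toList, "\r".toList)] [("&amp;".toList, "&".toList)] "&#9;".toList "\t".toList '&' "#9;".toList rfl htbl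
            (by simp [pvS]) (by simp [pvS]) (by decide) (by decide)
            (fun pr hpr => head?_exists (hpat2 pr hpr)) (by decide) t' hmem,
          pvScan_match "&#9;".toList "\t".toList '&' "#9;".toList rfl [("&lt;/a&gt;&#10;".toList, "</a>\n".toList), ("&lt;a href=&quot;".toList, "<a href=\"".toList), ("&quot;&gt;".toList, "\">".toList), ("&lt;/a&gt;".toList, "</a>".toList), ("&lt;".toList, "<".toList), ("&gt;".toList, ">".toList), ("&quot;".toList, "\"".toList), ("&#10;".toList, "\n".toList), ("&#13;".toList, "\r".toList)] [("&amp;".toList, "&".toList)] htbl t' hmem,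
          ih t' hlen']
    by_cases h11 : ("&amp;".toList) <+: (c :: t)
    · -- pattern 11 ("&amp;") is the first match
      obtain ⟨t', hs⟩ := h11
      have hlen' : t'.length ≤ n := by
        have hlc := congrArg List.length hs
        simp at hlc hsn
        omega
      rw [← hs]
      have htbl : pvTbl = [("&lt;/a&gt;&#10;".toList, "</a>\n".toList), ("&lt;a href=&quot;".toList, "<a href=\"".toList), ("&quot;&gt;".toList, "\">".toList), ("&lt;/a&gt;".toList, "</a>".toList), ("&lt;".toList, "<".toList), ("&gt;".toList, ">".toList), ("&quot;".toList, "\"".toList), ("&#10;".toList, "\n".toList), ("&#13;".toList, "\r".toList), ("&#9;".toList, "\t".toList)] ++ ("&amp;".toList, "&".toList) :: [] := by rfl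
      have hmem : ∀ pr ∈ ([("&lt;/a&gt;&#10;".toList, "</a>\n".toList), ("&lt;a href=&quot;".toList, "<a href=\"".toList), ("&quot;&gt;".toList, "\">".toList), ("&lt;/a&gt;".toList, "</a>".toList), ("&lt;".toList, "<".toList), ("&gt;".toList, ">".toList), ("&quot;".toList, "\"".toList), ("&#10;".toList, "\n".toList), ("&#13;".toList, "\r".toList), ("&#9;".toList, "\t".toList)] : List (List Char × List Char)), ¬ pr.1 <+: "&amp;".toList ++ t' := by
        intro pr hpr
        simp only [List.mem_cons, List.not_mem_nil, or_false] at hpr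
        rw [hs]
        rcases hpr with rfl | rfl | rfl | rfl | rfl | rfl | rfl | rfl | rfl | rfl
        exacts [h1, h2, h3, h4, h5, h6, h7, h8, h9, h10]
      have hpat2 : ∀ pr ∈ ([] : List (List Char × List Char)), pr.1.head? = some '&' := by decide
      rw [pvPass_decomp [("&lt;/a&gt;&#10;".toList, "</a>\n".toList), ("&lt;a href=&quot;".toList, "<a href=\"".toList), ("&quot;&gt;".toList, "\">".toList), ("&lt;/a&gt;".toList, "</a>".toList), ("&lt;".toList, "<".toList), ("&gt;".toList, ">".toList), ("&quot;".toList, "\"".toList), ("&#10;".toList, "\n".toList), ("&#13;".toList, "\r".toList), ("&#9;".toList, "\t".toList)] [] "&amp;".toList "&".toList '&' "amp;".toList rfl htbl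
            (by simp [pvS]) (by simp [pvS]) (by decide) (by decide)
            (fun pr hpr => head?_exists (hpat2 pr hpr)) (by decide) t' hmem,
          pvScan_match "&amp;".toList "&".toList '&' "amp;".toList rfl [("&lt;/a&gt;&#10;".toList, "</a>\n".toList), ("&lt;a href=&quot;".toList, "<a href=\"".toList), ("&quot;&gt;".toList, "\">".toList), ("&lt;/a&gt;".toList, "</a>".toList), ("&lt;".toList, "<".toList), ("&gt;".toList, ">".toList), ("&quot;".toList, "\"".toList), ("&#10;".toList, "\n".toList), ("&#13;".toList, "\r".toList), ("&#9;".toList, "\t".toList)] [] htbl t' hmem,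
          ih t' hlen']
    · -- no pattern matches at the head
      have hall : ∀ pr ∈ pvTbl, ¬ pr.1 <+: (c :: t) := by
        intro pr hpr
        simp only [pvTbl, List.mem_cons, List.not_mem_nil, or_false] at hpr
        rcases hpr with rfl | rfl | rfl | rfl | rfl | rfl | rfl | rfl | rfl | rfl | rfl
        exacts [h1, h2, h3, h4, h5, h6, h7, h8, h9, h10, h11]
      have hfind : pvTbl.find? (fun pr => pr.1.isPrefixOf (c :: t)) = none :=
        List.find?_eq_none.mpr (fun x hx => by
          simpa [List.isPrefixOf_iff_prefix] using hall x hx)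
      rw [pvPass_cons pvTbl pvTbl_good c t hall, ih t (by simp at hsn; omega), pvScan, hfind]

-- bridge: A's foldl of PySem.Str.replace, viewed on the character lists
theorem foldl_replace_toList :
    ∀ (L : List (String × String)) (s : String), (∀ pr ∈ L, pr.1.toList ≠ []) →
      (L.foldl (fun t pr => PySem.Str.replace t pr.1 pr.2) s).toList
        = pvPass (L.map (fun pr => (pr.1.toList, pr.2.toList))) s.toList := by
  intro L
  induction L with
  | nil => intro s _; rfl
  | cons pr L' ih =>
    intro s h
    calc ((pr :: L').foldl (fun t pr => PySem.Str.replace t pr.1 pr.2) s).toList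
        = (L'.foldl (fun t pr => PySem.Str.replace t pr.1 pr.2)
            (PySem.Str.replace s pr.1 pr.2)).toList := rfl
      _ = pvPass (L'.map (fun pr => (pr.1.toList, pr.2.toList)))
            (PySem.Str.replace s pr.1 pr.2).toList := ih _ (fun x hx => h x (by simp [hx]))
      _ = pvPass (L'.map (fun pr => (pr.1.toList, pr.2.toList)))
            (pvRep pr.1.toList pr.2.toList s.toList) := by
          rw [PySem.Str.toList_replace, replace_eq_pvRep _ _ _ (h pr (by simp))]
      _ = pvPass ((pr :: L').map (fun pr => (pr.1.toList, pr.2.toList))) s.toList := by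
          simp [pvPass]

-- ===== VERDICT (by name: the statement is the Claim_ definition above) =====
theorem clean_html_entities_in_attributes_spec : Claim_equal_clean_html_entities_in_attributes := by
  intro text _
  unfold Spec_clean_html_entities_in_attributes
  match text with
  | none => rfl
  | some s =>
    by_cases hs : s = ""
    · simp [clean_html_entities_in_attributes, clean_html_entities_in_attributes_alt, hs]
    · rw [clean_html_entities_in_attributes, clean_html_entities_in_attributes_alt]
      rw [if_neg hs, if_neg hs]
      have hlist :
          (([("&lt;/a&gt;&#10;", "</a>\n"), ("&lt;a href=&quot;", "<a href=\""), ("&quot;&gt;", "\">"), ("&lt;/a&gt;", "</a>"), ("&lt;", "<"), ("&gt;", ">"), ("&quot;", "\""), ("&#10;", "\n"), ("&#13;", "\r"), ("&#9;", "\t"), ("&amp;", "&")] : List (String × String)).foldl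
            (fun t pr => PySem.Str.replace t pr.1 pr.2) s).toList = pvScan s.toList := by
        rw [foldl_replace_toList _ s (by simp)]
        rw [show (([("&lt;/a&gt;&#10;", "</a>\n"), ("&lt;a href=&quot;", "<a href=\""), ("&quot;&gt;", "\">"), ("&lt;/a&gt;", "</a>"), ("&lt;", "<"), ("&gt;", ">"), ("&quot;", "\""), ("&#10;", "\n"), ("&#13;", "\r"), ("&#9;", "\t"), ("&amp;", "&")] : List (String × String)).map
              (fun pr => (pr.1.toList, pr.2.toList))) = pvTbl from rfl]
        exact pvPass_eq_pvScan s.toList.length s.toList le_rfl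
      have hitems : (PySem.Dict.mk ([("&lt;/a&gt;&#10;", "</a>\n"), ("&lt;a href=&quot;", "<a href=\""), ("&quot;&gt;", "\">"), ("&lt;/a&gt;", "</a>"), ("&lt;", "<"), ("&gt;", ">"), ("&quot;", "\""), ("&#10;", "\n"), ("&#13;", "\r"), ("&#9;", "\t"), ("&amp;", "&")] : List (String × String))).items = ([("&lt;/a&gt;&#10;", "</a>\n"), ("&lt;a href=&quot;", "<a href=\""), ("&quot;&gt;", "\">"), ("&lt;/a&gt;", "</a>"), ("&lt;", "<"), ("&gt;", ">"), ("&quot;", "\""), ("&#10;", "\n"), ("&#13;", "\r"), ("&#9;", "\t"), ("&amp;", "&")] : List (String × String)) := rfl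
      show some ((PySem.Dict.mk ([("&lt;/a&gt;&#10;", "</a>\n"), ("&lt;a href=&quot;", "<a href=\""), ("&quot;&gt;", "\">"), ("&lt;/a&gt;", "</a>"), ("&lt;", "<"), ("&gt;", ">"), ("&quot;", "\""), ("&#10;", "\n"), ("&#13;", "\r"), ("&#9;", "\t"), ("&amp;", "&")] : List (String × String))).items.foldl (fun t pr => PySem.Str.replace t pr.1 pr.2) s) = _
      rw [hitems]
      refine congrArg some ?_
      calc (([("&lt;/a&gt;&#10;", "</a>\n"), ("&lt;a href=&quot;", "<a href=\""), ("&quot;&gt;", "\">"), ("&lt;/a&gt;", "</a>"), ("&lt;", "<"), ("&gt;", ">"), ("&quot;", "\""), ("&#10;", "\n"), ("&#13;", "\r"), ("&#9;", "\t"), ("&amp;", "&")] : List (String × String)).foldl (fun t pr => PySem.Str.replace t pr.1 pr.2) s)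
          = String.ofList (([("&lt;/a&gt;&#10;", "</a>\n"), ("&lt;a href=&quot;", "<a href=\""), ("&quot;&gt;", "\">"), ("&lt;/a&gt;", "</a>"), ("&lt;", "<"), ("&gt;", ">"), ("&quot;", "\""), ("&#10;", "\n"), ("&#13;", "\r"), ("&#9;", "\t"), ("&amp;", "&")] : List (String × String)).foldl (fun t pr => PySem.Str.replace t pr.1 pr.2) s).toList := (String.ofList_toList).symm
        _ = String.ofList (pvScan s.toList) := by rw [hlist]
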